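-- pv_equiv track=rewrite | github.com/Deceptrax123/Cryptography-Lab | Lab-1/playful.py | generate_digrams
-- ===== SOURCE A (Python) =====
-- def generate_digrams(word):
--     word=word.replace(" ","")
--
--     digrams=list()
--     dig=""
--     for c,letter in enumerate(word):
--         dig+=letter
--         if (c+1)%2==0:
--             if dig[0]==dig[1]:
--                 dig=dig[0]+"x"
--             digrams.append(dig)
--             dig=""
--     if len(word)%2!=0:
--         digrams[-1]=digrams[-1][0]+"z"
--
--     return digrams
-- ===== SOURCE B (Python) =====
-- # B: build the digram list directly from pair-start indices with a comprehension,
-- # instead of A's char-by-char accumulator loop with a parity test.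
-- def generate_digrams(word):
--     word = word.replace(" ", "")
--     digrams = [word[i] + "x" if word[i] == word[i + 1] else word[i:i + 2]
--                for i in range(0, len(word) - 1, 2)]
--     if len(word) % 2 != 0:
--         digrams[-1] = digrams[-1][0] + "z"
--     return digrams
-- ===== Notes on version B (the rewrite author's own statement) =====
-- stated objective: simpler
-- what changed: A accumulates characters one by one with an enumerate counter and a parity test, flushing a buffer every second character; B builds each digram directly from its pair-start index with a single comprehension over range(0, len(word)-1, 2), keeping the same post-loop odd-length fix.
import Mathlib
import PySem

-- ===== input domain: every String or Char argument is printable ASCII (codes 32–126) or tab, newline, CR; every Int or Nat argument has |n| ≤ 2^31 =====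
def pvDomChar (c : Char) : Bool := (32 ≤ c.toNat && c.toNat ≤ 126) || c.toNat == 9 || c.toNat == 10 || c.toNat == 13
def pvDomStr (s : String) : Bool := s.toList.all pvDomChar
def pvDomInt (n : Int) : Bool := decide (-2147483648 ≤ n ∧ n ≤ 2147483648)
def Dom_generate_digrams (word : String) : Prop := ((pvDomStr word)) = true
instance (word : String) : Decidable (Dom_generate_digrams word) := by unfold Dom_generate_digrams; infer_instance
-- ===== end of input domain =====

-- B replaces A's char-by-char accumulator loop (enumerate counter + parity test + buffer)
-- by a direct comprehension over pair-start indices; objective: simpler.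

-- ===== PORT A =====
-- step of A's 'for c, letter in enumerate(word)' loop; state = (digrams, dig).
-- dig[0]/dig[1] are read via pyGetD with a dummy default: the branch only fires when
-- dig holds exactly 2 characters, so the default is never consulted (exact there).
def pvStepA (st : List (List Char) × List Char) (p : Int × Char) : List (List Char) × List Char :=
  let dig := st.2 ++ [p.2]
  if PySem.Int.mod (p.1 + 1) 2 = 0 then
    let dig := if PySem.List.pyGetD dig 0 ' ' = PySem.List.pyGetD dig 1 ' ' then
                 [PySem.List.pyGetD dig 0 ' ', 'x'] else dig
    (st.1 ++ [dig], [])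
  else (st.1, dig)

def generate_digrams (word : String) : List String :=
  let cs := PySem.Chars.replace word.toList [' '] []
  let st := (PySem.List.enumerate cs 0).foldl pvStepA ([], [])
  let digrams := st.1
  -- digrams[-1] = digrams[-1][0] + "z": exact when digrams ≠ [], which Pre_ guarantees
  let digrams :=
    if PySem.Int.mod ((cs.length : Int)) 2 ≠ 0 then
      digrams.dropLast ++ [[PySem.List.pyGetD (PySem.List.pyGetD digrams (-1) []) 0 ' ', 'z']]
    else digrams
  digrams.map String.ofList

-- ===== PORT B =====
-- the digram starting at index i; word[i]/word[i+1] are in range for every i the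
-- comprehension produces (i ≤ len-2), so the pyGetD default is never consulted (exact there).
def pvDigAt (cs : List Char) (i : Int) : List Char :=
  if PySem.List.pyGetD cs i ' ' = PySem.List.pyGetD cs (i + 1) ' ' then
    [PySem.List.pyGetD cs i ' ', 'x']
  else PySem.List.slice cs (some i) (some (i + 2))

def generate_digrams_alt (word : String) : List String :=
  let cs := PySem.Chars.replace word.toList [' '] []
  let digrams := (PySem.List.pyRange 0 ((cs.length : Int) - 1) 2).map (pvDigAt cs)
  -- digrams[-1] = digrams[-1][0] + "z": exact when digrams ≠ [], which Pre_ guarantees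
  let digrams :=
    if PySem.Int.mod ((cs.length : Int)) 2 ≠ 0 then
      digrams.dropLast ++ [[PySem.List.pyGetD (PySem.List.pyGetD digrams (-1) []) 0 ' ', 'z']]
    else digrams
  digrams.map String.ofList

-- ===== PRECONDITION & SPEC =====
-- Pre_ excludes exactly the words that reduce to a single non-space character: there both
-- Pythons raise IndexError on digrams[-1] (the digram list is empty).
def Pre_generate_digrams (word : String) : Prop :=
  (PySem.Chars.replace word.toList [' '] []).length ≠ 1
instance (word : String) : Decidable (Pre_generate_digrams word) := by
  unfold Pre_generate_digrams; infer_instance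
def pvWitness_generate_digrams : String := "hello  there"

def Spec_generate_digrams (word : String) (out : List String) : Prop := out = generate_digrams_alt word
instance (word : String) (out : List String) : Decidable (Spec_generate_digrams word out) := by unfold Spec_generate_digrams; infer_instance

-- ===== CLAIM (what is proved, stated in full; the proofs are below) =====
def Claim_equal_generate_digrams : Prop := ∀ (word : String), Dom_generate_digrams word → Pre_generate_digrams word → Spec_generate_digrams word (generate_digrams word)

-- ===== LEMMAS AND PROOFS =====

-- the digrams produced from a de-spaced word, two characters at a time (trailing odd char dropped)
def pvPairs : List Char → List (List Char)
  | a :: b :: t => (if a = b then [a, 'x'] else [a, b]) :: pvPairs t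
  | _ => []

-- the leftover buffer of A's loop: the trailing character on odd length, else empty
def pvRest : List Char → List Char
  | _ :: _ :: t => pvRest t
  | l => l

lemma pvRest_nil : pvRest [] = [] := rfl
lemma pvRest_single (a : Char) : pvRest [a] = [a] := rfl
lemma pvRest_cons₂ (a b : Char) (t : List Char) : pvRest (a :: b :: t) = pvRest t := rfl

lemma foldA : ∀ (cs : List Char) (acc : List (List Char)) (s : Int), s % 2 = 0 →
    (PySem.List.enumerate cs s).foldl pvStepA (acc, []) = (acc ++ pvPairs cs, pvRest cs)
  | [], acc, s, _ => by
      simp [PySem.List.enumerate_nil, pvPairs, pvRest_nil]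
  | [a], acc, s, hs => by
      have h1 : ¬ PySem.Int.mod (s + 1) 2 = 0 := by
        rw [PySem.Int.mod_eq_emod_of_pos (by norm_num)]; omega
      have hs1 : pvStepA (acc, []) (s, a) = (acc, [a]) := by
        simp only [pvStepA, List.nil_append]
        rw [if_neg h1]
      simp only [PySem.List.enumerate_cons, PySem.List.enumerate_nil, List.foldl_cons,
        List.foldl_nil, hs1, pvPairs, pvRest_single, List.append_nil]
  | a :: b :: t, acc, s, hs => by
      have h1 : ¬ PySem.Int.mod (s + 1) 2 = 0 := by
        rw [PySem.Int.mod_eq_emod_of_pos (by norm_num)]; omega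
      have h2 : PySem.Int.mod (s + 1 + 1) 2 = 0 := by
        rw [PySem.Int.mod_eq_emod_of_pos (by norm_num)]; omega
      have hg0 : PySem.List.pyGetD [a, b] 0 ' ' = a := by
        rw [PySem.List.pyGetD_of_nonneg _ _ (by norm_num)]; rfl
      have hg1 : PySem.List.pyGetD [a, b] 1 ' ' = b := by
        rw [PySem.List.pyGetD_of_nonneg _ _ (by norm_num)]; rfl
      have hs1 : pvStepA (acc, []) (s, a) = (acc, [a]) := by
        simp only [pvStepA, List.nil_append]
        rw [if_neg h1]
      have hs2 : pvStepA (acc, [a]) (s + 1, b)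
          = (acc ++ [if a = b then [a, 'x'] else [a, b]], []) := by
        simp only [pvStepA, List.singleton_append]
        rw [if_pos h2, hg0, hg1]
      have ih := foldA t (acc ++ [if a = b then [a, 'x'] else [a, b]]) (s + 1 + 1) (by omega)
      simp only [PySem.List.enumerate_cons, List.foldl_cons, hs1, hs2, ih,
        pvRest_cons₂, pvPairs, List.append_assoc, List.singleton_append]

lemma rangeB (n : Nat) :
    PySem.List.pyRange 0 ((n : Int) - 1) 2 = (List.range (n / 2)).map (fun k : Nat => 2 * (k : Int)) := by
  rw [PySem.List.pyRange_of_pos _ _ (by norm_num : (0 : Int) < 2)]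
  split_ifs with h
  · have hc : (((n : Int) - 1 - 0 + 2 - 1) / 2).toNat = n / 2 := by omega
    rw [hc]
    exact List.map_congr_left (fun k _ => by omega)
  · have h2 : n / 2 = 0 := by omega
    simp [h2]

lemma digAt_shift (a b : Char) (t : List Char) (k : Nat) :
    pvDigAt (a :: b :: t) (2 * ((k : Int) + 1)) = pvDigAt t (2 * (k : Int)) := by
  have e3 : (2 * ((k : Int) + 1) + 2) = ((2 * k + 1 + 1 + 2 : Nat) : Int) := by push_cast; ring
  have e2 : (2 * ((k : Int) + 1) + 1) = ((2 * k + 1 + 1 + 1 : Nat) : Int) := by push_cast; ring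
  have e1 : (2 * ((k : Int) + 1)) = ((2 * k + 1 + 1 : Nat) : Int) := by push_cast; ring
  have f3 : (2 * (k : Int) + 2) = ((2 * k + 2 : Nat) : Int) := by push_cast; ring
  have f2 : (2 * (k : Int) + 1) = ((2 * k + 1 : Nat) : Int) := by push_cast; ring
  have f1 : (2 * (k : Int)) = ((2 * k : Nat) : Int) := by push_cast; ring
  unfold pvDigAt
  rw [e3, e2, e1, f3, f2, f1]
  simp only [PySem.List.pyGetD_natCast, PySem.List.slice_natCast,
    List.getD_cons_succ, List.drop_succ_cons]
  have h1 : 2 * k + 1 + 1 + 2 - (2 * k + 1 + 1) = 2 := by omega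
  have h2 : 2 * k + 2 - 2 * k = 2 := by omega
  rw [h1, h2]

lemma mapB : ∀ (cs : List Char),
    (List.range (cs.length / 2)).map (fun k : Nat => pvDigAt cs (2 * (k : Int))) = pvPairs cs
  | [] => by simp [pvPairs]
  | [a] => by simp [pvPairs]
  | a :: b :: t => by
      have hlen : (a :: b :: t).length / 2 = t.length / 2 + 1 := by simp; omega
      rw [hlen, List.range_succ_eq_map, List.map_cons, List.map_map]
      have h0 : pvDigAt (a :: b :: t) (2 * ((0 : Nat) : Int)) = if a = b then [a, 'x'] else [a, b] := by
        have hg0 : PySem.List.pyGetD (a :: b :: t) (2 * ((0 : Nat) : Int)) ' ' = a := by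
          norm_num [PySem.List.pyGetD_zero_cons]
        have hg1 : PySem.List.pyGetD (a :: b :: t) (2 * ((0 : Nat) : Int) + 1) ' ' = b := by
          norm_num; rw [PySem.List.pyGetD_of_nonneg _ _ (by norm_num)]; rfl
        have hsl : PySem.List.slice (a :: b :: t) (some (2 * ((0 : Nat) : Int)))
            (some (2 * ((0 : Nat) : Int) + 2)) = [a, b] := by
          norm_num
          rw [PySem.List.slice_to _ (by norm_num : (0 : Int) ≤ 2)]
          rfl
        unfold pvDigAt
        rw [hg0, hg1, hsl]
      have hshift : (List.range (t.length / 2)).map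
            ((fun k : Nat => pvDigAt (a :: b :: t) (2 * (k : Int))) ∘ Nat.succ)
          = (List.range (t.length / 2)).map (fun k : Nat => pvDigAt t (2 * (k : Int))) := by
        apply List.map_congr_left
        intro k _
        show pvDigAt (a :: b :: t) (2 * ((k + 1 : Nat) : Int)) = pvDigAt t (2 * (k : Int))
        have hc : ((k + 1 : Nat) : Int) = (k : Int) + 1 := by push_cast; ring
        rw [hc, digAt_shift]
      rw [hshift, h0, mapB t, pvPairs]

-- ===== VERDICT (by name: the statement is the Claim_ definition above) =====
theorem generate_digrams_spec : Claim_equal_generate_digrams := by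
  intro word _ _
  unfold Spec_generate_digrams generate_digrams generate_digrams_alt
  simp only []
  rw [foldA (PySem.Chars.replace word.toList [' '] []) [] 0 (by norm_num),
     rangeB, List.map_map]
  have hcomp : ((pvDigAt (PySem.Chars.replace word.toList [' '] [])) ∘ (fun k : Nat => 2 * (k : Int)))
      = fun k : Nat => pvDigAt (PySem.Chars.replace word.toList [' '] []) (2 * (k : Int)) := rfl
  rw [hcomp, mapB]
  simp
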